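-- pv_equiv track=rewrite | github.com/Shivansh-00/Option-Pricing-Using-Monte-Carlo-Simulation-Deep-Learning | backend/app/rag/prompt_engine.py | _remove_redundant_evidence
-- ===== SOURCE A (Python) =====
-- def _remove_redundant_evidence(evidence: list[str]) -> list[str]:
--     """Remove evidence passages that are subsets of other passages."""
--     if len(evidence) <= 1:
--         return evidence
--
--     result: list[str] = []
--     for i, passage in enumerate(evidence):
--         is_redundant = False
--         p_lower = passage.lower()[:100]
--         for j, other in enumerate(evidence):
--             if i != j and p_lower in other.lower():
--                 is_redundant = True
--                 break
--         if not is_redundant: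
--             result.append(passage)
--
--     return result if result else evidence
-- ===== SOURCE B (Python) =====
-- def _remove_redundant_evidence(evidence: list[str]) -> list[str]:
--     """Remove evidence passages that are subsets of other passages."""
--     if len(evidence) <= 1:
--         return evidence
--     lowers = [p.lower() for p in evidence]
--     prefixes = [low[:100] for low in lowers]
--     lengths = set(len(q) for q in prefixes)
--     prefix_set = set(prefixes)
--     # multi-pattern search: slide windows of each needed length over every text
--     # and look them up in a hash set of prefixes; count, per prefix, in how many
--     # texts it occurs (its own text always matches, so "some other" == count >= 2)
--     containers: dict[str, int] = {}
--     for low in lowers: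
--         found = set()
--         for L in lengths:
--             for s in range(len(low) - L + 1):
--                 w = low[s:s + L]
--                 if w in prefix_set:
--                     found.add(w)
--         for w in found:
--             containers[w] = containers.get(w, 0) + 1
--     kept = [p for p, q in zip(evidence, prefixes) if containers.get(q, 0) < 2]
--     return kept if kept else evidence
-- ===== Notes on version B (the rewrite author's own statement) =====
-- stated objective: faster
-- what changed: Replaces A's pairwise nested substring scan (each passage's lowered 100-char prefix tested against every other passage, re-lowercasing it each time) by set/dict-based multi-pattern window matching: lowercase once, put all prefixes in a hash set, slide windows of each needed length over every text looking them up, and count per prefix in how many texts it occurs; since a prefix always occurs in its own text, 'contained in some other passage' becomes 'occurs in at least 2 texts'.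
import Mathlib
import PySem

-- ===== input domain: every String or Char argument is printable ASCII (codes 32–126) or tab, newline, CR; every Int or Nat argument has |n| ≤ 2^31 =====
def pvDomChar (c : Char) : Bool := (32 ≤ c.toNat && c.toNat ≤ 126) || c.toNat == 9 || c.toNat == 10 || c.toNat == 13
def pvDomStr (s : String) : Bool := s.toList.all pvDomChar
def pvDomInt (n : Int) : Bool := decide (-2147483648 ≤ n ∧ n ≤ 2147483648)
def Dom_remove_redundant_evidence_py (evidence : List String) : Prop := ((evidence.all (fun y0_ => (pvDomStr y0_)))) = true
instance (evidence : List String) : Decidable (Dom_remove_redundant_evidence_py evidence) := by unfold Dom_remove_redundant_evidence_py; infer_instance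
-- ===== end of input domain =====

-- B replaces A's pairwise nested substring scan by set/dict-based multi-pattern window
-- matching: lowercase once, collect all lowered 100-char prefixes in a hash set, slide
-- windows of each needed length over every text looking them up, and count per prefix in
-- how many texts it occurs; a prefix always occurs in its own text, so "contained in some
-- other passage" becomes "occurs in at least 2 texts".

-- ===== PORT A =====
-- inner 'for j, other in enumerate(evidence): if i != j and p_lower in other.lower(): break'
def pvA_isRed (i : Int) (pl : String) : List (Int × String) → Bool
  | [] => false
  | jo :: rest =>
      if i ≠ jo.1 ∧ PySem.Str.isIn pl (PySem.Str.lower jo.2) = true then true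
      else pvA_isRed i pl rest

def remove_redundant_evidence_py (evidence : List String) : List String :=
  if evidence.length ≤ 1 then evidence
  else
    let result := (PySem.List.enumerate evidence 0).foldl
      (fun acc ip =>
        let pl := PySem.Str.slice (PySem.Str.lower ip.2) none (some 100)
        if pvA_isRed ip.1 pl (PySem.List.enumerate evidence 0) then acc
        else acc ++ [ip.2]) []
    if result = [] then evidence else result

-- ===== PORT B =====
-- 'found': the inner two loops of Source B — windows of each length L in 'lengths' slid over
-- one lowered text, kept when they are in the prefix set
def pvB_found (prefixSet : PySem.Set String) (lengths : PySem.Set Int) (low : String) : PySem.Set String :=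
  lengths.foldl (fun f L =>
    (PySem.List.pyRange 0 (PySem.Str.len low - L + 1)).foldl (fun f s =>
      if PySem.Set.contains prefixSet (PySem.Str.slice low (some s) (some (s + L))) then
        PySem.Set.add f (PySem.Str.slice low (some s) (some (s + L)))
      else f) f) PySem.Set.empty

def remove_redundant_evidence_py_alt (evidence : List String) : List String :=
  if evidence.length ≤ 1 then evidence
  else
    let lowers := evidence.map PySem.Str.lower
    let prefixes := lowers.map (fun low => PySem.Str.slice low none (some 100))
    let lengths : PySem.Set Int := PySem.Set.ofList (prefixes.map PySem.Str.len)
    let prefixSet : PySem.Set String := PySem.Set.ofList prefixes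
    let containers : PySem.Dict String Int := lowers.foldl
      (fun d low => (pvB_found prefixSet lengths low).foldl
        (fun d w => d.insert w (d.getD w 0 + 1)) d) PySem.Dict.empty
    let kept := ((evidence.zip prefixes).filter
      (fun pq => containers.getD pq.2 0 < 2)).map (·.1)
    if kept = [] then evidence else kept

-- ===== PRECONDITION & SPEC =====
def Spec_remove_redundant_evidence_py (evidence : List String) (out : List String) : Prop := out = remove_redundant_evidence_py_alt evidence
instance (evidence : List String) (out : List String) : Decidable (Spec_remove_redundant_evidence_py evidence out) := by unfold Spec_remove_redundant_evidence_py; infer_instance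

-- ===== CLAIM (what is proved, stated in full; the proofs are below) =====
def Claim_equal_remove_redundant_evidence_py : Prop := ∀ (evidence : List String), Dom_remove_redundant_evidence_py evidence → Spec_remove_redundant_evidence_py evidence (remove_redundant_evidence_py evidence)

-- ===== LEMMAS AND PROOFS =====

-- A's lowered 100-char prefix of s occurs in s itself
theorem pv_self_match (s : String) :
    PySem.Str.isIn (PySem.Str.slice (PySem.Str.lower s) none (some 100)) (PySem.Str.lower s) = true := by
  rw [PySem.Str.isIn_iff_infix, PySem.Str.toList_slice, PySem.Chars.slice_eq_listSlice]
  have h1 := PySem.List.slice_to (PySem.Str.lower s).toList (b := 100) (by norm_num)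
  rw [h1]
  exact (List.take_prefix _ _).isInfix

-- A's inner break-loop is an existential over the scanned pairs
theorem pvA_isRed_iff (i : Int) (pl : String) (pairs : List (Int × String)) :
    pvA_isRed i pl pairs = true ↔
      ∃ jo ∈ pairs, i ≠ jo.1 ∧ PySem.Str.isIn pl (PySem.Str.lower jo.2) = true := by
  induction pairs with
  | nil => simp [pvA_isRed]
  | cons jo rest ih =>
      by_cases h : i ≠ jo.1 ∧ PySem.Str.isIn pl (PySem.Str.lower jo.2) = true
      · simp only [pvA_isRed, if_pos h]
        exact iff_of_true trivial ⟨jo, List.mem_cons_self, h⟩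
      · simp only [pvA_isRed, if_neg h, ih, List.mem_cons]
        constructor
        · rintro ⟨x, hx, hx2⟩; exact ⟨x, Or.inr hx, hx2⟩
        · rintro ⟨x, hx | hx, hx2⟩
          · exact absurd (hx ▸ hx2) h
          · exact ⟨x, hx, hx2⟩

-- counting with a guaranteed self-match: "two matches" = "a match elsewhere"
theorem pv_two_le_countP {α : Type} (l : List α) (q : α → Bool) (i : Nat)
    (hi : i < l.length) (hq : q l[i] = true) :
    2 ≤ l.countP q ↔ ∃ o ∈ l.eraseIdx i, q o = true := by
  have hcount : l.countP q =
      (List.take i l).countP q + (1 + (List.drop (i + 1) l).countP q) := by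
    calc l.countP q
        = (List.take i l ++ (l[i] :: List.drop (i + 1) l)).countP q := by
          rw [List.getElem_cons_drop hi, List.take_append_drop]
      _ = _ := by simp only [List.countP_append, List.countP_cons, hq, if_pos]; omega
  have herase : l.eraseIdx i = List.take i l ++ List.drop (i + 1) l :=
    List.eraseIdx_eq_take_drop_succ l i
  constructor
  · intro h2
    have : 0 < (List.take i l).countP q + (List.drop (i + 1) l).countP q := by omega
    rcases Nat.lt_or_ge 0 ((List.take i l).countP q) with hlt | hge
    · obtain ⟨o, ho, hqo⟩ := List.countP_pos_iff.mp hlt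
      exact ⟨o, herase ▸ List.mem_append_left _ ho, hqo⟩
    · have : 0 < (List.drop (i + 1) l).countP q := by omega
      obtain ⟨o, ho, hqo⟩ := List.countP_pos_iff.mp this
      exact ⟨o, herase ▸ List.mem_append_right _ ho, hqo⟩
  · rintro ⟨o, ho, hqo⟩
    rw [herase, List.mem_append] at ho
    rcases ho with ho | ho
    · have : 0 < (List.take i l).countP q := List.countP_pos_iff.mpr ⟨o, ho, hqo⟩
      omega
    · have : 0 < (List.drop (i + 1) l).countP q := List.countP_pos_iff.mpr ⟨o, ho, hqo⟩
      omega

-- the per-index predicate equivalence between A's scan and the common count form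
theorem pv_pred_eq (evidence : List String) (k : Nat) (hk : k < evidence.length) :
    pvA_isRed (k : Int)
        (PySem.Str.slice (PySem.Str.lower evidence[k]) none (some 100))
        (PySem.List.enumerate evidence 0)
      = decide (2 ≤ (evidence.map PySem.Str.lower).countP
          (fun o => PySem.Str.isIn
            (PySem.Str.slice (PySem.Str.lower evidence[k]) none (some 100)) o)) := by
  set pl := PySem.Str.slice (PySem.Str.lower evidence[k]) none (some 100) with hpl
  set q : String → Bool := fun o => PySem.Str.isIn pl o with hq
  have hqk : q ((evidence.map PySem.Str.lower)[k]'(by simpa using hk)) = true := by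
    simp only [hq, List.getElem_map]
    exact pv_self_match evidence[k]
  rw [eq_comm, Bool.eq_iff_iff, decide_eq_true_iff,
    pv_two_le_countP _ q k (by simpa using hk) hqk, pvA_isRed_iff]
  rw [List.eraseIdx_map]
  constructor
  · rintro ⟨o, ho, hqo⟩
    rw [List.mem_map] at ho
    obtain ⟨p, hp, rfl⟩ := ho
    obtain ⟨j, hj, hjk, rfl⟩ := List.mem_eraseIdx_iff_getElem.mp hp
    refine ⟨((j : Int), evidence[j]), ?_, ?_, hqo⟩
    · rw [PySem.List.mem_enumerate_iff]
      exact ⟨j, hj, by simp⟩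
    · simpa using fun h => hjk (by exact_mod_cast h.symm)
  · rintro ⟨jo, hjo, hne, hqo⟩
    rw [PySem.List.mem_enumerate_iff] at hjo
    obtain ⟨j, hj, rfl⟩ := hjo
    refine ⟨PySem.Str.lower evidence[j], ?_, hqo⟩
    exact List.mem_map_of_mem (List.mem_eraseIdx_iff_getElem.mpr
      ⟨j, hj, fun h => hne (by simp [h]), rfl⟩)

-- !(2 ≤ c) is c < 2, on Bool
theorem pv_not_two (c : Nat) : (!decide (2 ≤ c)) = decide (c < 2) := by
  by_cases h : 2 ≤ c
  · simp [h, Nat.not_lt.mpr h]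
  · simp [h, Nat.lt_of_not_le h]

-- A's append-loop is a filter
theorem pv_foldl_filter (c : Int × String → Bool) :
    ∀ (l : List (Int × String)) (acc : List String),
      l.foldl (fun acc ip => if c ip then acc else acc ++ [ip.2]) acc
        = acc ++ (l.filter (fun ip => !c ip)).map (·.2) := by
  intro l
  induction l with
  | nil => simp
  | cons x xs ih =>
      intro acc
      by_cases hx : c x
      · simp [hx, ih]
      · simp [hx, ih]

-- a filter over enumerate whose test agrees index-wise with a plain filter
theorem pv_filter_enumerate (P : Int × String → Bool) (Q : String → Bool) :
    ∀ (l : List String) (s : Int),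
      (∀ (k : Nat) (h : k < l.length), P (s + (k : Int), l[k]) = Q l[k]) →
      ((PySem.List.enumerate l s).filter P).map (·.2) = l.filter Q := by
  intro l
  induction l with
  | nil => intro s _; simp [PySem.List.enumerate_nil]
  | cons x xs ih =>
      intro s hagree
      rw [PySem.List.enumerate_cons]
      have h0 : P (s, x) = Q x := by simpa using hagree 0 (by simp)
      have hrest := ih (s + 1) (fun k h => by
        have := hagree (k + 1) (by simpa using Nat.succ_lt_succ h)
        simpa [add_assoc, add_comm, add_left_comm] using this)
      by_cases hP : P (s, x)
      · rw [List.filter_cons_of_pos hP, List.map_cons, hrest,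
          List.filter_cons_of_pos (h0 ▸ hP)]
      · rw [List.filter_cons_of_neg hP, hrest,
          List.filter_cons_of_neg (by rw [← h0]; exact hP)]

-- B: membership in a 'if test then add' fold over any list
theorem pv_mem_foldl_addif {α β : Type} [BEq α] [LawfulBEq α] (p : β → Bool) (g : β → α) (y : α) :
    ∀ (l : List β) (f : PySem.Set α),
      (y ∈ l.foldl (fun f x => if p x then PySem.Set.add f (g x) else f) f) ↔
        y ∈ f ∨ ∃ x ∈ l, p x = true ∧ y = g x := by
  intro l
  induction l with
  | nil => simp
  | cons x xs ih =>
      intro f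
      rw [List.foldl_cons]
      by_cases hx : p x
      · rw [if_pos hx, ih, PySem.Set.mem_add]
        simp only [List.exists_mem_cons_iff, hx, true_and]
        tauto
      · rw [if_neg hx, ih]
        simp only [List.exists_mem_cons_iff, hx]
        tauto

-- B: such a fold preserves distinctness
theorem pv_nodup_foldl_addif {α β : Type} [BEq α] [LawfulBEq α] (p : β → Bool) (g : β → α) :
    ∀ (l : List β) (f : PySem.Set α), f.Nodup →
      (l.foldl (fun f x => if p x then PySem.Set.add f (g x) else f) f).Nodup := by
  intro l
  induction l with
  | nil => intro f h; exact h
  | cons x xs ih =>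
      intro f h
      rw [List.foldl_cons]
      by_cases hx : p x
      · rw [if_pos hx]; exact ih _ (PySem.Set.nodup_add f (g x) h)
      · rw [if_neg hx]; exact ih _ h

-- B: what the window-scan of one text collects
theorem pv_mem_found (pset : PySem.Set String) (low : String) (y : String) :
    ∀ (lens : List Int),
      (y ∈ pvB_found pset lens low) ↔
        ∃ L ∈ lens, ∃ s ∈ PySem.List.pyRange 0 (PySem.Str.len low - L + 1),
          PySem.Set.contains pset (PySem.Str.slice low (some s) (some (s + L))) = true ∧
          y = PySem.Str.slice low (some s) (some (s + L)) := by
  have aux : ∀ (lens : List Int) (f : PySem.Set String),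
      (y ∈ lens.foldl (fun f L =>
        (PySem.List.pyRange 0 (PySem.Str.len low - L + 1)).foldl (fun f s =>
          if PySem.Set.contains pset (PySem.Str.slice low (some s) (some (s + L))) then
            PySem.Set.add f (PySem.Str.slice low (some s) (some (s + L)))
          else f) f) f) ↔
        y ∈ f ∨ ∃ L ∈ lens, ∃ s ∈ PySem.List.pyRange 0 (PySem.Str.len low - L + 1),
          PySem.Set.contains pset (PySem.Str.slice low (some s) (some (s + L))) = true ∧
          y = PySem.Str.slice low (some s) (some (s + L)) := by
    intro lens
    induction lens with
    | nil => simp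
    | cons L rest ih =>
        intro f
        rw [List.foldl_cons, ih,
          pv_mem_foldl_addif (fun s => PySem.Set.contains pset (PySem.Str.slice low (some s) (some (s + L))))
            (fun s => PySem.Str.slice low (some s) (some (s + L))) y]
        simp only [List.exists_mem_cons_iff]
        exact or_assoc
  intro lens
  rw [pvB_found, aux]
  simp [PySem.Set.empty]

theorem pv_nodup_found (pset : PySem.Set String) (lens : List Int) (low : String) :
    (pvB_found pset lens low).Nodup := by
  rw [pvB_found]
  have aux : ∀ (lens : List Int) (f : PySem.Set String), f.Nodup →
      (lens.foldl (fun f L =>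
        (PySem.List.pyRange 0 (PySem.Str.len low - L + 1)).foldl (fun f s =>
          if PySem.Set.contains pset (PySem.Str.slice low (some s) (some (s + L))) then
            PySem.Set.add f (PySem.Str.slice low (some s) (some (s + L)))
          else f) f) f).Nodup := by
    intro lens
    induction lens with
    | nil => intro f h; exact h
    | cons L rest ih =>
        intro f h
        rw [List.foldl_cons]
        exact ih _ (pv_nodup_foldl_addif _ _ _ f h)
  exact aux lens PySem.Set.empty (by simp [PySem.Set.empty])

-- a Python slice l[s:s+L] with 0 ≤ s, 0 ≤ L is drop-then-take
theorem pv_slice_int (l : List Char) (s L : Int) (hs : 0 ≤ s) (hL : 0 ≤ L) :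
    PySem.List.slice l (some s) (some (s + L)) = (l.drop s.toNat).take L.toNat := by
  obtain ⟨a, rfl⟩ : ∃ a : Nat, s = (a : Int) := ⟨s.toNat, by omega⟩
  obtain ⟨b, rfl⟩ : ∃ b : Nat, L = (b : Int) := ⟨L.toNat, by omega⟩
  rw [show ((a : Int) + b) = ((a + b : Nat) : Int) by push_cast; ring,
    PySem.List.slice_natCast]
  simp

-- an infix is exactly a window: starting position + matching take
theorem pv_infix_iff_window (q l : List Char) :
    q <:+: l ↔ ∃ s : Nat, s + q.length ≤ l.length ∧ (l.drop s).take q.length = q := by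
  constructor
  · rintro ⟨u, t, rfl⟩
    refine ⟨u.length, by simp, ?_⟩
    rw [List.append_assoc, List.drop_left, List.take_left]
  · rintro ⟨s, _, hq⟩
    exact ((hq ▸ List.take_prefix q.length (l.drop s)).isInfix).trans
      (List.drop_suffix s l).isInfix

-- B: for an actual prefix q, "collected from low" = "q is a substring of low"
theorem pv_found_iff_isIn (prefixes : List String) (low q : String) (hq : q ∈ prefixes) :
    (q ∈ pvB_found (PySem.Set.ofList prefixes)
        (PySem.Set.ofList (prefixes.map PySem.Str.len)) low)
      ↔ PySem.Str.isIn q low = true := by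
  rw [pv_mem_found]
  constructor
  · rintro ⟨L, hL, s, hs, _, rfl⟩
    rw [PySem.List.mem_pyRange_one] at hs
    have hL0 : 0 ≤ L := by
      rw [PySem.Set.mem_ofList, List.mem_map] at hL
      obtain ⟨q', _, rfl⟩ := hL
      rw [PySem.Str.len_eq]
      positivity
    rw [PySem.Str.isIn_iff_infix, PySem.Str.toList_slice, PySem.Chars.slice_eq_listSlice,
      pv_slice_int _ _ _ hs.1 hL0]
    exact ((List.take_prefix _ _).isInfix).trans (List.drop_suffix _ _).isInfix
  · intro h
    rw [PySem.Str.isIn_iff_infix, pv_infix_iff_window] at h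
    obtain ⟨s, hlen, hwin⟩ := h
    have hslice : PySem.Str.slice low (some (s : Int)) (some ((s : Int) + PySem.Str.len q)) = q := by
      apply String.toList_inj.mp
      rw [PySem.Str.toList_slice, PySem.Chars.slice_eq_listSlice,
        pv_slice_int _ _ _ (by positivity) (by rw [PySem.Str.len_eq]; positivity),
        PySem.Str.len_eq]
      simp only [Int.toNat_natCast]
      exact hwin
    refine ⟨PySem.Str.len q, ?_, (s : Int), ?_, ?_, hslice.symm⟩
    · rw [PySem.Set.mem_ofList]
      exact List.mem_map_of_mem hq
    · rw [PySem.List.mem_pyRange_one, PySem.Str.len_eq, PySem.Str.len_eq]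
      constructor
      · positivity
      · omega
    · rw [hslice, PySem.Set.contains_iff, PySem.Set.mem_ofList]
      exact hq

-- B: the counting loop over the texts reads back the number of texts that collected q
theorem pv_getD_containers (lowers : List String) (found : String → PySem.Set String)
    (hnd : ∀ low, (found low).Nodup) (q : String) :
    ∀ d : PySem.Dict String Int,
      (lowers.foldl (fun d low => (found low).foldl
          (fun d w => d.insert w (d.getD w 0 + 1)) d) d).getD q 0
        = d.getD q 0 + (lowers.countP (fun low => decide (q ∈ found low)) : Int) := by
  induction lowers with
  | nil => intro d; simp
  | cons low rest ih =>
      intro d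
      rw [List.foldl_cons, ih, PySem.Dict.getD_foldl_insert_add_one]
      by_cases h : q ∈ found low
      · rw [List.count_eq_one_of_mem (hnd low) h, List.countP_cons]
        simp only [h, decide_true, if_pos]
        push_cast
        ring
      · rw [List.count_eq_zero.mpr h, List.countP_cons]
        simp only [h, decide_false]
        push_cast
        ring

-- ===== VERDICT (by name: the statement is the Claim_ definition above) =====
theorem remove_redundant_evidence_py_spec : Claim_equal_remove_redundant_evidence_py := by
  intro evidence _
  show remove_redundant_evidence_py evidence = remove_redundant_evidence_py_alt evidence
  unfold remove_redundant_evidence_py remove_redundant_evidence_py_alt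
  by_cases hlen : evidence.length ≤ 1
  · simp [hlen]
  · simp only [if_neg hlen]
    set lowers := evidence.map PySem.Str.lower with hlowers
    set prefixes := lowers.map (fun low => PySem.Str.slice low none (some 100)) with hprefixes
    set pset := PySem.Set.ofList prefixes with hpset
    set lens := PySem.Set.ofList (prefixes.map PySem.Str.len) with hlens
    set containers : PySem.Dict String Int := lowers.foldl
      (fun d low => (pvB_found pset lens low).foldl
        (fun d w => d.insert w (d.getD w 0 + 1)) d) PySem.Dict.empty with hcontainers
    -- the common form: keep p iff its prefix matches < 2 lowered texts
    have pref_mem : ∀ p ∈ evidence,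
        PySem.Str.slice (PySem.Str.lower p) none (some 100) ∈ prefixes := by
      intro p hp
      rw [hprefixes, hlowers, List.map_map]
      exact List.mem_map_of_mem hp
    have hB : ((evidence.zip prefixes).filter
        (fun pq => containers.getD pq.2 0 < 2)).map (·.1)
        = evidence.filter (fun p => lowers.countP
            (fun o => PySem.Str.isIn (PySem.Str.slice (PySem.Str.lower p) none (some 100)) o) < 2) := by
      have hzip : evidence.zip prefixes
          = evidence.map (fun p => (p, PySem.Str.slice (PySem.Str.lower p) none (some 100))) := by
        rw [hprefixes, hlowers, List.map_map]
        have h := List.zip_map' (f := fun p : String => p)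
          (g := fun p => PySem.Str.slice (PySem.Str.lower p) none (some 100)) (l := evidence)
        simp only [List.map_id'] at h
        rw [← h]
        rfl
      rw [hzip, List.filter_map, List.map_map]
      simp only [Function.comp_def, List.map_id']
      apply List.filter_congr
      intro p hp
      have hcnt : containers.getD (PySem.Str.slice (PySem.Str.lower p) none (some 100)) 0
          = (lowers.countP (fun o => PySem.Str.isIn
              (PySem.Str.slice (PySem.Str.lower p) none (some 100)) o) : Int) := by
        rw [hcontainers, pv_getD_containers lowers (pvB_found pset lens)
          (fun low => pv_nodup_found pset lens low) _ PySem.Dict.empty]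
        rw [PySem.Dict.getD_empty, zero_add]
        congr 1
        apply List.countP_congr
        intro o _
        rw [decide_eq_true_eq, hpset, hlens]
        exact pv_found_iff_isIn prefixes o _ (pref_mem p hp)
      rw [hcnt]
      apply decide_eq_decide.mpr
      omega
    have hA : (PySem.List.enumerate evidence 0).foldl
        (fun acc ip =>
          if pvA_isRed ip.1 (PySem.Str.slice (PySem.Str.lower ip.2) none (some 100))
              (PySem.List.enumerate evidence 0) then acc
          else acc ++ [ip.2]) []
        = evidence.filter (fun p => lowers.countP
            (fun o => PySem.Str.isIn (PySem.Str.slice (PySem.Str.lower p) none (some 100)) o) < 2) := by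
      rw [pv_foldl_filter]
      rw [List.nil_append]
      apply pv_filter_enumerate
      intro k hk
      simp only [zero_add, pv_pred_eq evidence k hk]
      exact pv_not_two _
    simp only [hA, hB]
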